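-- pv_equiv track=rewrite | github.com/satheesh-chiploop/chiploop-saas | backend/agents/system/system_sva_assertions_agent.py | _merge_ports
-- ===== SOURCE A (Python) =====
-- from typing import Any, Dict, List, Optional, Tuple
--
-- def _merge_ports(primary: List[Dict[str, Any]], fallback: List[Dict[str, Any]]) -> List[Dict[str, Any]]:
--     merged: Dict[str, Dict[str, Any]] = {}
--
--     for p in fallback:
--         if not isinstance(p, dict) or not p.get("name"):
--             continue
--         merged[str(p["name"])] = dict(p)
--
--     for p in primary:
--         if not isinstance(p, dict) or not p.get("name"):
--             continue
--         merged[str(p["name"])] = dict(p)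
--
--     return [merged[k] for k in sorted(merged.keys())]
-- ===== SOURCE B (Python) =====
-- from typing import Any, Dict, List
--
--
-- def _merge_ports(primary: List[Dict[str, Any]], fallback: List[Dict[str, Any]]) -> List[Dict[str, Any]]:
--     # Alternative decomposition: no accumulator dict. Collect the valid entries
--     # (fallback first, then primary), list the distinct names in sorted order,
--     # and for each name take the LAST valid entry carrying it (so primary,
--     # being later, overrides fallback, and later duplicates win).
--     entries = [p for p in fallback + primary if isinstance(p, dict) and p.get("name")]
--     names = sorted({str(p["name"]) for p in entries})
--     result = []
--     for n in names:
--         chosen = None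
--         for p in entries:
--             if str(p["name"]) == n:
--                 chosen = p
--         result.append(dict(chosen))
--     return result
-- ===== Notes on version B (the rewrite author's own statement) =====
-- stated objective: alternative
-- what changed: Replaces A's name-keyed override dict (fallback then primary inserted, then keys sorted) with a direct decomposition: filter valid entries of fallback+primary, sort the distinct names, and for each name pick the last matching entry by a linear scan.
import Mathlib
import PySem

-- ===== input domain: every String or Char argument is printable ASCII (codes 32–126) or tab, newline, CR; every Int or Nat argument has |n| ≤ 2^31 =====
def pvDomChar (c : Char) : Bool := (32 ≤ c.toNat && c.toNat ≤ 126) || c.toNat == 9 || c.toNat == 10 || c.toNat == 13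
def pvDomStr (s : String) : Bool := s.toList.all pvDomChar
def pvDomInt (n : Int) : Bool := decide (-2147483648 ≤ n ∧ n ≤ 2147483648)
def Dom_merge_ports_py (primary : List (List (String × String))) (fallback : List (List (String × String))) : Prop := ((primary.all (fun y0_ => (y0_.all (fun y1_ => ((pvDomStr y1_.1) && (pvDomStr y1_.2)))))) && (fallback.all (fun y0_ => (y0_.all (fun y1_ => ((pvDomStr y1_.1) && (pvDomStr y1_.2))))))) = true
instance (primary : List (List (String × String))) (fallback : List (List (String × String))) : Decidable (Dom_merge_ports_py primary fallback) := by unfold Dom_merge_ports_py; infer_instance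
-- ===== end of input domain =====

-- B replaces A's override dict with a sorted distinct-name list plus a last-match scan per name
-- (objective: alternative decomposition, same observable result).

-- shared transliteration helpers: both Pythons perform exactly this truthiness test and key
-- (isinstance(p, dict) is always true at this type; port values are str, so str(p["name"]) = p["name"])
def pvName? (p : List (String × String)) : Option String :=
  (PySem.Dict.ofList p).get? "name"          -- p.get("name") on the dict the pairs denote
def pvValid (p : List (String × String)) : Bool :=
  match pvName? p with | some s => !(s == "") | none => false   -- 'p.get("name")' is truthy
def pvKey (p : List (String × String)) : String :=
  (pvName? p).getD ""                        -- str(p["name"]) (only used where pvValid holds)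

-- ===== PORT A =====
def merge_ports_py (primary : List (List (String × String))) (fallback : List (List (String × String))) : List (List (String × String)) :=
  -- merged = {}; two for-loops inserting dict(p) under str(p["name"]); skip invalid entries
  let merged := fallback.foldl
    (fun m p => if pvValid p then m.insert (pvKey p) (PySem.Dict.ofList p) else m)
    PySem.Dict.empty
  let merged := primary.foldl
    (fun m p => if pvValid p then m.insert (pvKey p) (PySem.Dict.ofList p) else m)
    merged
  -- [merged[k] for k in sorted(merged.keys())]; k is always a key, so the getD default is unreachable
  (PySem.List.sorted merged.keys (fun k => k) false).map
    (fun k => (merged.getD k PySem.Dict.empty).items)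

-- ===== PORT B =====
def merge_ports_py_alt (primary : List (List (String × String))) (fallback : List (List (String × String))) : List (List (String × String)) :=
  -- entries = [p for p in fallback + primary if p.get("name")]
  let entries := (fallback ++ primary).filter pvValid
  -- names = sorted({str(p["name"]) for p in entries})
  let names := PySem.List.sorted (PySem.Set.ofList (entries.map pvKey)) (fun n => n) false
  -- for n in names: chosen = last entry with that name; result.append(dict(chosen))
  names.foldl
    (fun res n =>
      match entries.foldl (fun c p => if pvKey p = n then some p else c)
              (none : Option (List (String × String))) with
      | some p => res ++ [(PySem.Dict.ofList p).items]
      | none => res)   -- unreachable: every n ∈ names is some entry's name (Python would raise on dict(None))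
    []

-- ===== PRECONDITION & SPEC =====
def Spec_merge_ports_py (primary : List (List (String × String))) (fallback : List (List (String × String))) (out : List (List (String × String))) : Prop := out = merge_ports_py_alt primary fallback
instance (primary : List (List (String × String))) (fallback : List (List (String × String))) (out : List (List (String × String))) : Decidable (Spec_merge_ports_py primary fallback out) := by unfold Spec_merge_ports_py; infer_instance

-- ===== CLAIM (what is proved, stated in full; the proofs are below) =====
def Claim_equal_merge_ports_py : Prop := ∀ (primary : List (List (String × String))) (fallback : List (List (String × String))), Dom_merge_ports_py primary fallback → Spec_merge_ports_py primary fallback (merge_ports_py primary fallback)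

-- ===== LEMMAS AND PROOFS =====

-- the value A's insert-loop stores under k is the last list entry keyed k (B's inner scan)
theorem pv_getD_foldl_insert (L : List (List (String × String)))
    (m : PySem.Dict String (PySem.Dict String String))
    (c : Option (List (String × String))) (k : String)
    (h : m.getD k PySem.Dict.empty =
      (match c with | some p => PySem.Dict.ofList p | none => PySem.Dict.empty)) :
    (L.foldl (fun m p => m.insert (pvKey p) (PySem.Dict.ofList p)) m).getD k PySem.Dict.empty =
      (match L.foldl (fun c p => if pvKey p = k then some p else c) c with
       | some p => PySem.Dict.ofList p | none => PySem.Dict.empty) := by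
  induction L generalizing m c with
  | nil => simpa using h
  | cons a L ih =>
    simp only [List.foldl_cons]
    by_cases ha : pvKey a = k
    · rw [if_pos ha]
      refine ih _ (some a) ?_
      rw [PySem.Dict.getD_insert, if_pos ha.symm]
    · rw [if_neg ha]
      refine ih _ c ?_
      rw [PySem.Dict.getD_insert, if_neg (fun h' => ha h'.symm)]
      exact h

-- B's inner scan finds an entry whenever k occurs among the keys
theorem pv_pick_isSome (L : List (List (String × String)))
    (c : Option (List (String × String))) (k : String)
    (h : k ∈ L.map pvKey ∨ c.isSome) :
    (L.foldl (fun c p => if pvKey p = k then some p else c) c).isSome := by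
  induction L generalizing c with
  | nil => simpa using h.resolve_left (by simp)
  | cons a L ih =>
    simp only [List.foldl_cons]
    by_cases ha : pvKey a = k
    · exact ih _ (Or.inr (by simp [ha]))
    · refine ih _ ?_
      rcases h with h | h
      · rcases (by simpa using h) with h | h
        · exact absurd h.symm ha
        · exact Or.inl (by simpa using h)
      · exact Or.inr (by simpa [ha] using h)

-- ===== VERDICT (by name: the statement is the Claim_ definition above) =====
theorem merge_ports_py_spec : Claim_equal_merge_ports_py := by
  intro primary fallback _
  unfold Spec_merge_ports_py merge_ports_py merge_ports_py_alt
  dsimp only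
  rw [← List.foldl_append,
      PySem.List.foldl_if_eq_foldl_filter pvValid
        (fun m p => m.insert (pvKey p) (PySem.Dict.ofList p)) (fallback ++ primary)
        PySem.Dict.empty]
  set L := (fallback ++ primary).filter pvValid with hL
  set merged := L.foldl (fun m p => m.insert (pvKey p) (PySem.Dict.ofList p)) PySem.Dict.empty
    with hmerged
  have hkeys : merged.keys = PySem.Set.ofList (L.map pvKey) := by
    rw [hmerged, PySem.Dict.keys_foldl_insert_key (key := pvKey)
      (f := fun _ p => PySem.Dict.ofList p)]
    simp [PySem.Dict.keys_empty, PySem.Set.ofList_eq_foldl, PySem.Set.update]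
  rw [hkeys]
  set names := PySem.List.sorted (PySem.Set.ofList (L.map pvKey)) (fun n => n) false with hnames
  have hmem : ∀ n ∈ names, n ∈ L.map pvKey := by
    intro n hn
    exact (PySem.Set.mem_ofList _ _).1
      ((PySem.List.mem_sorted (PySem.Set.ofList (L.map pvKey)) (fun n => n) false n).1
        (hnames ▸ hn))
  have hstep : ∀ res : List (List (String × String)), ∀ n ∈ names,
      (match L.foldl (fun c p => if pvKey p = n then some p else c)
          (none : Option (List (String × String))) with
        | some p => res ++ [(PySem.Dict.ofList p).items]
        | none => res)
      = res ++ [((match L.foldl (fun c p => if pvKey p = n then some p else c)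
          (none : Option (List (String × String))) with
        | some p => PySem.Dict.ofList p | none => PySem.Dict.empty)).items] := by
    intro res n hn
    have hs := pv_pick_isSome L none n (Or.inl (hmem n hn))
    rcases Option.isSome_iff_exists.1 hs with ⟨p, hp⟩
    rw [hp]
  calc (PySem.List.sorted (PySem.Set.ofList (L.map pvKey)) (fun k => k) false).map
        (fun k => (merged.getD k PySem.Dict.empty).items)
      = names.map (fun n => ((match L.foldl (fun c p => if pvKey p = n then some p else c)
          (none : Option (List (String × String))) with
        | some p => PySem.Dict.ofList p | none => PySem.Dict.empty)).items) := by
        refine List.map_congr_left ?_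
        intro n _
        rw [hmerged, pv_getD_foldl_insert L PySem.Dict.empty none n (by simp)]
    _ = names.foldl
        (fun res n => res ++
          [((match L.foldl (fun c p => if pvKey p = n then some p else c)
              (none : Option (List (String × String))) with
            | some p => PySem.Dict.ofList p | none => PySem.Dict.empty)).items]) [] := by
        rw [PySem.List.foldl_append_singleton_eq_map]
        simp
    _ = names.foldl
        (fun res n =>
          match L.foldl (fun c p => if pvKey p = n then some p else c)
              (none : Option (List (String × String))) with
          | some p => res ++ [(PySem.Dict.ofList p).items]
          | none => res) [] :=
        (PySem.List.foldl_congr_mem' names _ _ [] (fun n hn res => hstep res n hn)).symm
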